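-- pv_equiv track=rewrite | github.com/nishkarshsharma051-ai/SML-small-language-model- | brain.py | _clean_identity_leaks
-- ===== SOURCE A (Python) =====
-- def _clean_identity_leaks(text: str) -> str:
--     """Forcefully override any stubborn pre-trained identity leaks."""
--     if not text:
--         return text
--
--     # Specific phrases to catch
--     leaks = {
--         "Alibaba Cloud": "Nishkarsh Sharma",
--         "Alibaba": "Nishkarsh Sharma",
--         "Qwen": "Ting Ling Ling",
--         "created by Google": "created by Nishkarsh Sharma",
--         "developed by Google": "developed by Nishkarsh Sharma",
--         "I am a large language model": f"I am Ting Ling Ling, a high-fidelity AI developed by Nishkarsh Sharma",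
--     }
--
--     cleaned = text
--     for leak, replacement in leaks.items():
--         cleaned = cleaned.replace(leak, replacement)
--
--     return cleaned
-- ===== SOURCE B (Python) =====
-- import re
--
-- _LEAK_MAP = {
--     "Alibaba Cloud": "Nishkarsh Sharma",
--     "Alibaba": "Nishkarsh Sharma",
--     "Qwen": "Ting Ling Ling",
--     "created by Google": "created by Nishkarsh Sharma",
--     "developed by Google": "developed by Nishkarsh Sharma",
--     "I am a large language model": "I am Ting Ling Ling, a high-fidelity AI developed by Nishkarsh Sharma",
-- }
--
-- # One alternation over the six literal phrases, in dict order so that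
-- # "Alibaba Cloud" is tried before "Alibaba"; a single left-to-right pass
-- # replaces the six sequential scans.  Exact because no replacement value
-- # contains (or forms at its boundaries) any of the six phrases.
-- _LEAK_RE = re.compile("|".join(re.escape(leak) for leak in _LEAK_MAP))
--
--
-- def _clean_identity_leaks(text: str) -> str:
--     """Forcefully override any stubborn pre-trained identity leaks."""
--     if not text:
--         return text
--     return _LEAK_RE.sub(lambda m: _LEAK_MAP[m.group(0)], text)
-- ===== Notes on version B (the rewrite author's own statement) =====
-- stated objective: idiomatic
-- what changed: B replaces the six sequential str.replace passes with one compiled regex alternation (phrases in dict order, so 'Alibaba Cloud' precedes 'Alibaba') applied in a single left-to-right re.sub pass with a dict lookup per match.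
import Mathlib
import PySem

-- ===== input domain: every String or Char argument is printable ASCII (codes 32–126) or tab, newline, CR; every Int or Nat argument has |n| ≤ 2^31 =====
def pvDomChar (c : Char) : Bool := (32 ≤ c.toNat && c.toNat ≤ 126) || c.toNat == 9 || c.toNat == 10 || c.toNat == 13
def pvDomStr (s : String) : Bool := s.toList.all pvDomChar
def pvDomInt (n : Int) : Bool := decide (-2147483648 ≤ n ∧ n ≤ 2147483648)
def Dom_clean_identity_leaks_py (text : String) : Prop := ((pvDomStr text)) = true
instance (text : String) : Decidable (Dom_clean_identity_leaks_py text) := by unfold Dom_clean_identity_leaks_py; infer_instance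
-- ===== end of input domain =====

-- B replaces A's six sequential str.replace passes by ONE left-to-right pass (a regex
-- alternation of the six literal phrases, in dict order); objective: idiomatic/single-pass.

-- ===== PORT A =====
-- A builds a dict of phrases and applies str.replace once per entry, in insertion order.
def clean_identity_leaks_py (text : String) : String :=
  if text = "" then text
  else
    let leaks : PySem.Dict String String := PySem.Dict.ofList
      [("Alibaba Cloud", "Nishkarsh Sharma"),
       ("Alibaba", "Nishkarsh Sharma"),
       ("Qwen", "Ting Ling Ling"),
       ("created by Google", "created by Nishkarsh Sharma"),
       ("developed by Google", "developed by Nishkarsh Sharma"),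
       ("I am a large language model", "I am Ting Ling Ling, a high-fidelity AI developed by Nishkarsh Sharma")]
    leaks.items.foldl (fun cleaned p => PySem.Str.replace cleaned p.1 p.2) text

-- ===== PORT B =====
-- B compiles "|".join(re.escape(leak) for leak in _LEAK_MAP) and calls _LEAK_RE.sub once.
-- pvLeakPairs is the compiled pattern together with the lookup map: the alternatives in
-- pattern (= dict) order, each paired with its replacement.
def pvLeakPairs : List (List Char × List Char) :=
  [("Alibaba Cloud".toList, "Nishkarsh Sharma".toList),
   ("Alibaba".toList, "Nishkarsh Sharma".toList),
   ("Qwen".toList, "Ting Ling Ling".toList),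
   ("created by Google".toList, "created by Nishkarsh Sharma".toList),
   ("developed by Google".toList, "developed by Nishkarsh Sharma".toList),
   ("I am a large language model".toList, "I am Ting Ling Ling, a high-fidelity AI developed by Nishkarsh Sharma".toList)]

-- Hand port (exact here) of re.sub with an alternation of literal phrases: at each
-- position the alternatives are tried in pattern order; on a match the mapped
-- replacement is emitted and scanning resumes after the match, else the character is
-- copied.  (This is Python's leftmost-match, first-alternative rule for literal
-- alternatives; the !isEmpty guard is vacuous for these patterns.)
def pvScan (ps : List (List Char × List Char)) (s : List Char) : List Char :=
  match s with
  | [] => []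
  | c :: t =>
    match hfind : ps.find? (fun p => !p.1.isEmpty && p.1.isPrefixOf (c :: t)) with
    | some kv => kv.2 ++ pvScan ps ((c :: t).drop kv.1.length)
    | none => c :: pvScan ps t
termination_by s.length
decreasing_by
  · have hp := List.find?_some hfind
    simp only [Bool.and_eq_true, Bool.not_eq_true', List.isEmpty_eq_false_iff] at hp
    have : 1 ≤ kv.1.length := by
      cases hkv : kv.1 with
      | nil => exact absurd hkv hp.1
      | cons a l => simp
    simp only [List.length_drop, List.length_cons]
    omega
  · simp

def clean_identity_leaks_py_alt (text : String) : String :=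
  if text = "" then text
  else String.ofList (pvScan pvLeakPairs text.toList)

-- ===== PRECONDITION & SPEC =====
def Spec_clean_identity_leaks_py (text : String) (out : String) : Prop := out = clean_identity_leaks_py_alt text
instance (text : String) (out : String) : Decidable (Spec_clean_identity_leaks_py text out) := by unfold Spec_clean_identity_leaks_py; infer_instance

-- ===== CLAIM (what is proved, stated in full; the proofs are below) =====
def Claim_equal_clean_identity_leaks_py : Prop := ∀ (text : String), Dom_clean_identity_leaks_py text → Spec_clean_identity_leaks_py text (clean_identity_leaks_py text)

-- ===== LEMMAS AND PROOFS =====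

-- Decidable side conditions on concrete phrases/replacements, checked by `decide`.
-- pvFree k x: no occurrence of k can start inside or at a suffix of x (so a pass for k
-- walks straight over x no matter what follows it).
def pvFree (k x : List Char) : Bool :=
  x.tails.all (fun u => u.isEmpty || (!(k.isPrefixOf u) && !(u.isPrefixOf k)))
-- pvTails k x: no proper tail of k aligns with the front of x.
def pvTails (k x : List Char) : Bool :=
  (List.range k.length).all (fun j => j == 0 || (!((k.drop j).isPrefixOf x) && !(x.isPrefixOf (k.drop j))))
-- pvNoOcc km k: km cannot match starting strictly inside k.
def pvNoOcc (km k : List Char) : Bool :=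
  (List.range k.length).all (fun p => p == 0 || (!(km.isPrefixOf (k.drop p)) && !((k.drop p).isPrefixOf km)))
-- pvOk ps k: all the interaction-freeness facts needed to merge the pass for k into a
-- scan over the earlier pairs ps.
def pvOk (ps : List (List Char × List Char)) (k : List Char) : Bool :=
  !k.isEmpty && ps.all (fun p => !p.1.isEmpty && pvFree k p.2 && pvTails k p.2 && pvNoOcc p.1 k)

theorem pv_prefix_split {k x z : List Char} (h : k <+: x ++ z) : k <+: x ∨ x <+: k :=
  List.prefix_or_prefix_of_prefix h (List.prefix_append x z)

theorem pvScan_nil (ps : List (List Char × List Char)) : pvScan ps [] = [] := by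
  simp [pvScan]

theorem pvScan_cons_some {ps : List (List Char × List Char)} {c : Char} {t : List Char}
    {kv : List Char × List Char}
    (h : ps.find? (fun p => !p.1.isEmpty && p.1.isPrefixOf (c :: t)) = some kv) :
    pvScan ps (c :: t) = kv.2 ++ pvScan ps ((c :: t).drop kv.1.length) := by
  rw [pvScan, h]

theorem pvScan_cons_none {ps : List (List Char × List Char)} {c : Char} {t : List Char}
    (h : ps.find? (fun p => !p.1.isEmpty && p.1.isPrefixOf (c :: t)) = none) :
    pvScan ps (c :: t) = c :: pvScan ps t := by
  rw [pvScan, h]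

-- single-pattern scan steps
theorem pvScan_single_pos {k v : List Char} {s : List Char} (hk : k ≠ []) (hp : k <+: s)
    (hs : s ≠ []) : pvScan [(k, v)] s = v ++ pvScan [(k, v)] (s.drop k.length) := by
  cases s with
  | nil => exact absurd rfl hs
  | cons c t =>
    have hke : k.isEmpty = false := by simp [hk]
    have : List.find? (fun p => !p.1.isEmpty && p.1.isPrefixOf (c :: t)) [(k, v)] = some (k, v) := by
      simp [List.find?, hke, List.isPrefixOf_iff_prefix.mpr hp]
    rw [pvScan_cons_some this]

theorem pvScan_single_neg {k v : List Char} {c : Char} {t : List Char} (hp : ¬ k <+: (c :: t)) :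
    pvScan [(k, v)] (c :: t) = c :: pvScan [(k, v)] t := by
  have hb : (!k.isEmpty && k.isPrefixOf (c :: t)) = false := by
    have : k.isPrefixOf (c :: t) = false := by
      rw [Bool.eq_false_iff]
      exact fun h => hp (List.isPrefixOf_iff_prefix.mp h)
    simp [this]
  have : List.find? (fun p => !p.1.isEmpty && p.1.isPrefixOf (c :: t)) [(k, v)] = none := by
    simp [List.find?, hb]
  rw [pvScan_cons_none this]

theorem pvScan_chunk {k v : List Char} (hk : k ≠ []) (z : List Char) :
    pvScan [(k, v)] (k ++ z) = v ++ pvScan [(k, v)] z := by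
  have h1 : k ++ z ≠ [] := by
    cases k with
    | nil => exact absurd rfl hk
    | cons a l => simp
  rw [pvScan_single_pos hk (List.prefix_append k z) h1, List.drop_left]

-- PySem.Chars.replace (nonempty pattern) IS the single-pattern scan.
theorem pvReplaceGo_eq {k v : List Char} (hk : k ≠ []) :
    ∀ (fuel : Nat) (l acc : List Char), l.length ≤ fuel →
      PySem.Chars.replace.go k v fuel l acc = acc.reverse ++ pvScan [(k, v)] l := by
  intro fuel
  induction fuel with
  | zero =>
    intro l acc hl
    have : l = [] := by
      cases l with
      | nil => rfl
      | cons a t => simp at hl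
    subst this
    simp [PySem.Chars.replace.go, pvScan_nil]
  | succ n ih =>
    intro l acc hl
    cases l with
    | nil => simp [PySem.Chars.replace.go, pvScan_nil]
    | cons c t =>
      by_cases hp : k <+: (c :: t)
      · have hpre : k.isPrefixOf (c :: t) = true := List.isPrefixOf_iff_prefix.mpr hp
        have hk1 : 1 ≤ k.length := by
          cases k with
          | nil => exact absurd rfl hk
          | cons a l => simp
        rw [show PySem.Chars.replace.go k v (n+1) (c :: t) acc
              = PySem.Chars.replace.go k v n ((c :: t).drop k.length) (v.reverse ++ acc) by
            simp [PySem.Chars.replace.go, hpre]]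
        rw [ih ((c :: t).drop k.length) (v.reverse ++ acc) (by simp at hl ⊢; omega)]
        rw [pvScan_single_pos hk hp (by simp)]
        simp
      · have hpre : k.isPrefixOf (c :: t) = false := by
          rw [Bool.eq_false_iff]
          intro h
          exact hp (List.isPrefixOf_iff_prefix.mp h)
        rw [show PySem.Chars.replace.go k v (n+1) (c :: t) acc
              = PySem.Chars.replace.go k v n t (c :: acc) by
            simp [PySem.Chars.replace.go, hpre]]
        rw [ih t (c :: acc) (by simp at hl ⊢; omega)]
        rw [pvScan_single_neg hp]
        simp

theorem pvReplace_eq_scan {k v : List Char} (hk : k ≠ []) (s : List Char) :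
    PySem.Chars.replace s k v = pvScan [(k, v)] s := by
  rw [PySem.Chars.replace]
  have : k.isEmpty = false := by
    cases k with
    | nil => exact absurd rfl hk
    | cons a l => rfl
  rw [this]
  simp only [Bool.false_eq_true, if_false]
  have := pvReplaceGo_eq (v := v) hk s.length s [] (le_refl _)
  simpa using this

-- pvFree facts
theorem pvFree_tail {k : List Char} {c : Char} {x : List Char} (h : pvFree k (c :: x) = true) :
    pvFree k x = true := by
  simp only [pvFree, List.tails_cons, List.all_cons, Bool.and_eq_true] at h
  exact h.2

theorem pvFree_head {k : List Char} {c : Char} {x : List Char} (h : pvFree k (c :: x) = true) :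
    ¬ k <+: (c :: x) ∧ ¬ (c :: x) <+: k := by
  simp only [pvFree, List.tails_cons, List.all_cons, Bool.and_eq_true] at h
  have := h.1
  simp only [List.isEmpty_cons, Bool.false_or, Bool.and_eq_true, Bool.not_eq_true',
    Bool.eq_false_iff] at this
  exact ⟨fun hp => this.1 (List.isPrefixOf_iff_prefix.mpr hp), fun hp => this.2 (List.isPrefixOf_iff_prefix.mpr hp)⟩

-- a pass for k walks straight over a pvFree block x
theorem pvScan_append_free {k v x : List Char} (hfree : pvFree k x = true) :
    ∀ z, pvScan [(k, v)] (x ++ z) = x ++ pvScan [(k, v)] z := by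
  induction x with
  | nil => intro z; simp
  | cons c x ih =>
    intro z
    have hz : ¬ k <+: (c :: (x ++ z)) := by
      intro hp
      rcases pv_prefix_split (x := c :: x) (z := z) (by simpa using hp) with h | h
      · exact (pvFree_head hfree).1 h
      · exact (pvFree_head hfree).2 h
    rw [List.cons_append, pvScan_single_neg hz, ih (pvFree_tail hfree) z]
    simp

-- unpack pvOk for a member of ps
theorem pvOk_mem {ps : List (List Char × List Char)} {k : List Char}
    (hok : pvOk ps k = true) {p : List Char × List Char} (hmem : p ∈ ps) :
    p.1 ≠ [] ∧ pvFree k p.2 = true ∧ pvTails k p.2 = true ∧ pvNoOcc p.1 k = true := by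
  have h := (Bool.and_eq_true_iff.mp hok).2
  rw [List.all_eq_true] at h
  have := h p hmem
  simp only [Bool.and_eq_true, Bool.not_eq_true', List.isEmpty_eq_false_iff] at this
  exact ⟨this.1.1.1, this.1.1.2, this.1.2, this.2⟩

theorem pvOk_key {ps : List (List Char × List Char)} {k : List Char}
    (hok : pvOk ps k = true) : k ≠ [] := by
  have h := (Bool.and_eq_true_iff.mp hok).1
  simpa using h

theorem pvTails_spec {k x : List Char} (h : pvTails k x = true) {j : Nat}
    (h1 : 1 ≤ j) (h2 : j < k.length) : ¬ (k.drop j) <+: x ∧ ¬ x <+: (k.drop j) := by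
  rw [pvTails, List.all_eq_true] at h
  have := h j (List.mem_range.mpr h2)
  simp only [beq_iff_eq, Bool.or_eq_true, Bool.and_eq_true,
    Bool.not_eq_true', Bool.eq_false_iff] at this
  rcases this with h0 | hh
  · omega
  · exact ⟨fun hp => hh.1 (List.isPrefixOf_iff_prefix.mpr hp), fun hp => hh.2 (List.isPrefixOf_iff_prefix.mpr hp)⟩

theorem pvNoOcc_spec {km k : List Char} (h : pvNoOcc km k = true) {p : Nat}
    (h1 : 1 ≤ p) (h2 : p < k.length) : ¬ km <+: (k.drop p) ∧ ¬ (k.drop p) <+: km := by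
  rw [pvNoOcc, List.all_eq_true] at h
  have := h p (List.mem_range.mpr h2)
  simp only [beq_iff_eq, Bool.or_eq_true, Bool.and_eq_true,
    Bool.not_eq_true', Bool.eq_false_iff] at this
  rcases this with h0 | hh
  · omega
  · exact ⟨fun hp => hh.1 (List.isPrefixOf_iff_prefix.mpr hp), fun hp => hh.2 (List.isPrefixOf_iff_prefix.mpr hp)⟩

-- no replacement made by the ps-scan can complete a pending occurrence of k:
-- if a proper tail of k heads the scanned text, it already headed the source.
theorem pvNoleak {ps : List (List Char × List Char)} {k : List Char}
    (hok : pvOk ps k = true) :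
    ∀ (n : Nat) (s : List Char), s.length ≤ n → ∀ j, 1 ≤ j → j < k.length →
      (k.drop j) <+: pvScan ps s → (k.drop j) <+: s := by
  intro n
  induction n with
  | zero =>
    intro s hs j h1 h2 hp
    have : s = [] := by
      cases s with
      | nil => rfl
      | cons a t => simp at hs
    subst this
    rw [pvScan_nil] at hp
    have := List.prefix_nil.mp hp
    have : k.length ≤ j := by
      have := congrArg List.length this
      simp at this
      omega
    omega
  | succ n ih =>
    intro s hs j h1 h2 hp
    cases s with
    | nil =>
      rw [pvScan_nil] at hp
      have := List.prefix_nil.mp hp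
      have : k.length ≤ j := by
        have := congrArg List.length this
        simp at this
        omega
      omega
    | cons c t =>
      cases hm : List.find? (fun p => !p.1.isEmpty && p.1.isPrefixOf (c :: t)) ps with
      | some kv =>
        rw [pvScan_cons_some hm] at hp
        have hmem := List.mem_of_find?_eq_some hm
        have htails := (pvOk_mem hok hmem).2.2.1
        rcases pv_prefix_split hp with h | h
        · exact absurd h (pvTails_spec htails h1 h2).1
        · exact absurd h (pvTails_spec htails h1 h2).2
      | none =>
        rw [pvScan_cons_none hm] at hp
        have hdrop : k.drop j = k[j] :: k.drop (j + 1) := List.drop_eq_getElem_cons h2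
        rw [hdrop] at hp
        rw [List.cons_prefix_cons] at hp
        obtain ⟨hcj, hrest⟩ := hp
        by_cases hlast : j + 1 = k.length
        · have : k.drop (j + 1) = [] := by
            rw [List.drop_eq_nil_iff]
            omega
          rw [hdrop, this, hcj]
          simp [List.cons_prefix_cons]
        · have h2' : j + 1 < k.length := by omega
          have := ih t (by simp at hs; omega) (j + 1) (by omega) h2' hrest
          rw [hdrop, hcj]
          exact List.cons_prefix_cons.mpr ⟨rfl, this⟩

-- the ps-scan walks straight through the interior of k
theorem pvWalk {ps : List (List Char × List Char)} {k : List Char}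
    (hok : pvOk ps k = true) :
    ∀ (n p : Nat) (t : List Char), p + n = k.length → 1 ≤ p →
      pvScan ps (k.drop p ++ t) = k.drop p ++ pvScan ps t := by
  intro n
  induction n with
  | zero =>
    intro p t hpn hp1
    have : k.drop p = [] := by
      rw [List.drop_eq_nil_iff]
      omega
    simp [this]
  | succ m ih =>
    intro p t hpn hp1
    have hp2 : p < k.length := by omega
    have hdrop : k.drop p = k[p] :: k.drop (p + 1) := List.drop_eq_getElem_cons hp2
    have hnone : List.find? (fun q => !q.1.isEmpty && q.1.isPrefixOf (k[p] :: (k.drop (p+1) ++ t))) ps = none := by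
      rw [List.find?_eq_none]
      intro q hq
      simp only [Bool.and_eq_true, Bool.not_eq_true', List.isEmpty_eq_false_iff, not_and]
      intro _ hpre
      have hpre' : q.1 <+: (k.drop p ++ t) := by
        rw [hdrop, List.cons_append]
        exact List.isPrefixOf_iff_prefix.mp hpre
      have hnoocc := (pvOk_mem hok hq).2.2.2
      rcases pv_prefix_split hpre' with h | h
      · exact (pvNoOcc_spec hnoocc hp1 hp2).1 h
      · exact (pvNoOcc_spec hnoocc hp1 hp2).2 h
    calc pvScan ps (k.drop p ++ t)
        = pvScan ps (k[p] :: (k.drop (p + 1) ++ t)) := by rw [hdrop, List.cons_append]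
      _ = k[p] :: pvScan ps (k.drop (p + 1) ++ t) := pvScan_cons_none hnone
      _ = k[p] :: (k.drop (p + 1) ++ pvScan ps t) := by
            by_cases hlast : p + 1 = k.length
            · have : k.drop (p + 1) = [] := by rw [List.drop_eq_nil_iff]; omega
              simp [this]
            · rw [ih (p + 1) t (by omega) (by omega)]
      _ = k.drop p ++ pvScan ps t := by rw [hdrop, List.cons_append]

-- MERGE: applying the single pass for (k, v) after the scan over ps is the scan over
-- ps with (k, v) appended as the lowest-priority alternative.
theorem pvMerge {ps : List (List Char × List Char)} {k v : List Char}
    (hok : pvOk ps k = true) :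
    ∀ (n : Nat) (s : List Char), s.length ≤ n →
      pvScan [(k, v)] (pvScan ps s) = pvScan (ps ++ [(k, v)]) s := by
  have hk := pvOk_key hok
  have hk1 : 1 ≤ k.length := by
    cases hkk : k with
    | nil => exact absurd hkk hk
    | cons a l => simp
  intro n
  induction n with
  | zero =>
    intro s hs
    have : s = [] := by
      cases s with
      | nil => rfl
      | cons a t => simp at hs
    subst this
    simp [pvScan_nil]
  | succ n ih =>
    intro s hs
    cases s with
    | nil => simp [pvScan_nil]
    | cons c t =>
      cases hm : List.find? (fun p => !p.1.isEmpty && p.1.isPrefixOf (c :: t)) ps with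
      | some kv =>
        have hpred := List.find?_some hm
        simp only [Bool.and_eq_true, Bool.not_eq_true', List.isEmpty_eq_false_iff] at hpred
        have hkv1 : 1 ≤ kv.1.length := by
          cases hkk : kv.1 with
          | nil => exact absurd hkk hpred.1
          | cons a l => simp
        have hfree := (pvOk_mem hok (List.mem_of_find?_eq_some hm)).2.1
        have hm' : List.find? (fun p => !p.1.isEmpty && p.1.isPrefixOf (c :: t)) (ps ++ [(k, v)]) = some kv := by
          rw [List.find?_append, hm]
          rfl
        rw [pvScan_cons_some hm, pvScan_cons_some hm']
        rw [pvScan_append_free hfree]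
        rw [ih ((c :: t).drop kv.1.length) (by simp at hs ⊢; omega)]
      | none =>
        by_cases hkp : k <+: (c :: t)
        · -- k matches at the front; the ps-scan walks through it, then the k-pass fires.
          obtain ⟨k', hk'⟩ : ∃ k', k = c :: k' := by
            cases hkk : k with
            | nil => exact absurd hkk hk
            | cons a l =>
              rw [hkk] at hkp
              rw [List.cons_prefix_cons] at hkp
              exact ⟨l, by rw [hkp.1]⟩
          have hk'pre : k' <+: t := by
            rw [hk'] at hkp
            exact (List.cons_prefix_cons.mp hkp).2
          set t' := t.drop k'.length with ht'
          have htsplit : t = k' ++ t' := by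
            have := List.prefix_iff_eq_append.mp hk'pre
            rw [← this]
          have hsdrop : (c :: t).drop k.length = t' := by
            rw [hk', htsplit]
            simp
          have hwalk : pvScan ps t = k' ++ pvScan ps t' := by
            have hkd : k.drop 1 = k' := by rw [hk']; simp
            by_cases hk'nil : k' = []
            · subst hk'nil
              simp at htsplit
              rw [← htsplit]
              simp
            · have := pvWalk hok (k.length - 1) 1 t' (by omega) (le_refl 1)
              rw [hkd] at this
              rw [htsplit, this]
          have hscons : pvScan ps (c :: t) = c :: pvScan ps t := pvScan_cons_none hm
          have hchain : pvScan ps (c :: t) = k ++ pvScan ps t' := by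
            rw [hscons, hwalk, hk', List.cons_append]
          have hm' : List.find? (fun p => !p.1.isEmpty && p.1.isPrefixOf (c :: t)) (ps ++ [(k, v)]) = some (k, v) := by
            rw [List.find?_append, hm]
            have hke : k.isEmpty = false := by simp [hk]
            simp [List.find?, hke, List.isPrefixOf_iff_prefix.mpr hkp]
          rw [hchain, pvScan_chunk hk, pvScan_cons_some hm']
          simp only [hsdrop]
          rw [ih t' (by rw [ht']; simp at hs ⊢; omega)]
        · -- no alternative matches at the front: both scans copy c.
          have hscons : pvScan ps (c :: t) = c :: pvScan ps t := pvScan_cons_none hm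
          have hnol : ¬ k <+: (c :: pvScan ps t) := by
            intro habs
            obtain ⟨k', hk'⟩ : ∃ k', k = c :: k' := by
              cases hkk : k with
              | nil => exact absurd hkk hk
              | cons a l =>
                rw [hkk] at habs
                rw [List.cons_prefix_cons] at habs
                exact ⟨l, by rw [habs.1]⟩
            by_cases hk'nil : k' = []
            · apply hkp
              rw [hk', hk'nil]
              simp [List.cons_prefix_cons]
            · have hk'len : 1 < k.length := by
                rw [hk']
                cases hkk : k' with
                | nil => exact absurd hkk hk'nil
                | cons a l => simp
              have hrest : k.drop 1 <+: pvScan ps t := by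
                rw [hk'] at habs
                have := (List.cons_prefix_cons.mp habs).2
                rw [hk']
                simpa using this
              have := pvNoleak hok t.length t (le_refl _) 1 (le_refl 1) hk'len hrest
              apply hkp
              rw [hk']
              refine List.cons_prefix_cons.mpr ⟨rfl, ?_⟩
              rw [hk'] at this
              simpa using this
          have hm' : List.find? (fun p => !p.1.isEmpty && p.1.isPrefixOf (c :: t)) (ps ++ [(k, v)]) = none := by
            rw [List.find?_append, hm]
            have hb : (!k.isEmpty && k.isPrefixOf (c :: t)) = false := by
              have : k.isPrefixOf (c :: t) = false := by
                rw [Bool.eq_false_iff]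
                exact fun h => hkp (List.isPrefixOf_iff_prefix.mp h)
              simp [this]
            simp [List.find?, hb]
          rw [hscons, pvScan_single_neg hnol, pvScan_cons_none hm']
          rw [ih t (by simp at hs; omega)]

theorem pvMerge' {ps : List (List Char × List Char)} {k v : List Char}
    (hok : pvOk ps k = true) (s : List Char) :
    pvScan [(k, v)] (pvScan ps s) = pvScan (ps ++ [(k, v)]) s :=
  pvMerge hok s.length s (le_refl _)

-- chain the six passes
theorem pvChain (s : List Char) :
    pvScan pvLeakPairs s =
      PySem.Chars.replace (PySem.Chars.replace (PySem.Chars.replace (PySem.Chars.replace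
        (PySem.Chars.replace (PySem.Chars.replace s
          "Alibaba Cloud".toList "Nishkarsh Sharma".toList)
          "Alibaba".toList "Nishkarsh Sharma".toList)
          "Qwen".toList "Ting Ling Ling".toList)
          "created by Google".toList "created by Nishkarsh Sharma".toList)
          "developed by Google".toList "developed by Nishkarsh Sharma".toList)
          "I am a large language model".toList
          "I am Ting Ling Ling, a high-fidelity AI developed by Nishkarsh Sharma".toList := by
  rw [pvReplace_eq_scan (k := "Alibaba Cloud".toList) (v := "Nishkarsh Sharma".toList) (by decide)]
  rw [pvReplace_eq_scan (k := "Alibaba".toList) (v := "Nishkarsh Sharma".toList) (by decide)]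
  rw [pvMerge' (ps := [("Alibaba Cloud".toList, "Nishkarsh Sharma".toList)])
      (k := "Alibaba".toList) (v := "Nishkarsh Sharma".toList) (by decide)]
  simp only [List.cons_append, List.nil_append]
  rw [pvReplace_eq_scan (k := "Qwen".toList) (v := "Ting Ling Ling".toList) (by decide)]
  rw [pvMerge' (ps := [("Alibaba Cloud".toList, "Nishkarsh Sharma".toList),
        ("Alibaba".toList, "Nishkarsh Sharma".toList)])
      (k := "Qwen".toList) (v := "Ting Ling Ling".toList) (by decide)]
  simp only [List.cons_append, List.nil_append]
  rw [pvReplace_eq_scan (k := "created by Google".toList) (v := "created by Nishkarsh Sharma".toList) (by decide)]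
  rw [pvMerge' (ps := [("Alibaba Cloud".toList, "Nishkarsh Sharma".toList),
        ("Alibaba".toList, "Nishkarsh Sharma".toList),
        ("Qwen".toList, "Ting Ling Ling".toList)])
      (k := "created by Google".toList) (v := "created by Nishkarsh Sharma".toList) (by decide)]
  simp only [List.cons_append, List.nil_append]
  rw [pvReplace_eq_scan (k := "developed by Google".toList) (v := "developed by Nishkarsh Sharma".toList) (by decide)]
  rw [pvMerge' (ps := [("Alibaba Cloud".toList, "Nishkarsh Sharma".toList),
        ("Alibaba".toList, "Nishkarsh Sharma".toList),
        ("Qwen".toList, "Ting Ling Ling".toList),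
        ("created by Google".toList, "created by Nishkarsh Sharma".toList)])
      (k := "developed by Google".toList) (v := "developed by Nishkarsh Sharma".toList) (by decide)]
  simp only [List.cons_append, List.nil_append]
  rw [pvReplace_eq_scan (k := "I am a large language model".toList)
      (v := "I am Ting Ling Ling, a high-fidelity AI developed by Nishkarsh Sharma".toList) (by decide)]
  rw [pvMerge' (ps := [("Alibaba Cloud".toList, "Nishkarsh Sharma".toList),
        ("Alibaba".toList, "Nishkarsh Sharma".toList),
        ("Qwen".toList, "Ting Ling Ling".toList),
        ("created by Google".toList, "created by Nishkarsh Sharma".toList),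
        ("developed by Google".toList, "developed by Nishkarsh Sharma".toList)])
      (k := "I am a large language model".toList)
      (v := "I am Ting Ling Ling, a high-fidelity AI developed by Nishkarsh Sharma".toList) (by decide)]
  simp only [List.cons_append, List.nil_append]
  rfl

-- ===== VERDICT (by name: the statement is the Claim_ definition above) =====
theorem clean_identity_leaks_py_spec : Claim_equal_clean_identity_leaks_py := by
  intro text _
  unfold Spec_clean_identity_leaks_py clean_identity_leaks_py clean_identity_leaks_py_alt
  by_cases h : text = ""
  · simp [h]
  · rw [if_neg h, if_neg h]
    have hitems : (PySem.Dict.ofList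
        [("Alibaba Cloud", "Nishkarsh Sharma"),
         ("Alibaba", "Nishkarsh Sharma"),
         ("Qwen", "Ting Ling Ling"),
         ("created by Google", "created by Nishkarsh Sharma"),
         ("developed by Google", "developed by Nishkarsh Sharma"),
         ("I am a large language model", "I am Ting Ling Ling, a high-fidelity AI developed by Nishkarsh Sharma")]
          : PySem.Dict String String).items
        = [("Alibaba Cloud", "Nishkarsh Sharma"),
           ("Alibaba", "Nishkarsh Sharma"),
           ("Qwen", "Ting Ling Ling"),
           ("created by Google", "created by Nishkarsh Sharma"),
           ("developed by Google", "developed by Nishkarsh Sharma"),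
           ("I am a large language model", "I am Ting Ling Ling, a high-fidelity AI developed by Nishkarsh Sharma")] := by
      decide
    show List.foldl (fun cleaned p => PySem.Str.replace cleaned p.1 p.2) text
      (PySem.Dict.ofList
        [("Alibaba Cloud", "Nishkarsh Sharma"),
         ("Alibaba", "Nishkarsh Sharma"),
         ("Qwen", "Ting Ling Ling"),
         ("created by Google", "created by Nishkarsh Sharma"),
         ("developed by Google", "developed by Nishkarsh Sharma"),
         ("I am a large language model", "I am Ting Ling Ling, a high-fidelity AI developed by Nishkarsh Sharma")]
        : PySem.Dict String String).items
      = String.ofList (pvScan pvLeakPairs text.toList)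
    rw [hitems]
    simp only [List.foldl]
    set big := PySem.Str.replace (PySem.Str.replace (PySem.Str.replace (PySem.Str.replace
      (PySem.Str.replace (PySem.Str.replace text
        "Alibaba Cloud" "Nishkarsh Sharma")
        "Alibaba" "Nishkarsh Sharma")
        "Qwen" "Ting Ling Ling")
        "created by Google" "created by Nishkarsh Sharma")
        "developed by Google" "developed by Nishkarsh Sharma")
        "I am a large language model"
        "I am Ting Ling Ling, a high-fidelity AI developed by Nishkarsh Sharma" with hbig
    have htl : big.toList = pvScan pvLeakPairs text.toList := by
      rw [hbig]
      simp only [PySem.Str.toList_replace]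
      exact (pvChain text.toList).symm
    calc big = String.ofList big.toList := (String.ofList_toList (s := big)).symm
      _ = String.ofList (pvScan pvLeakPairs text.toList) := by rw [htl]
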